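-- pv_equiv track=rewrite | github.com/fatibahrami771998/advent-of-code-2025 | 2025/Day-9/day-9-part-2.py | max_rectangle_area_part2
-- ===== SOURCE A (Python) =====
-- from typing import List, Tuple
--
-- Point = Tuple[int, int]
--
-- def rectangle_area(p1: Point, p2: Point) -> int:
--     x1, y1 = p1
--     x2, y2 = p2
--     width = abs(x1 - x2) + 1
--     height = abs(y1 - y2) + 1
--     return width * height
--
-- def rectangle_is_valid(p1: Point, p2: Point, poly: List[Point]) -> bool:
--     x1, y1 = p1
--     x2, y2 = p2
--
--     x_min = min(x1, x2)
--     x_max = max(x1, x2)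
--     y_min = min(y1, y2)
--     y_max = max(y1, y2)
--
--     n = len(poly)
--
--     for i in range(n):
--         lx, ly = poly[i]
--         lx2, ly2 = poly[(i + 1) % n]
--
--         if (
--             max(lx, lx2) <= x_min
--             or min(lx, lx2) >= x_max
--             or max(ly, ly2) <= y_min
--             or min(ly, ly2) >= y_max
--         ):
--             continue
--
--         return False
--
--     return True
--
-- def max_rectangle_area_part2(points: List[Point]) -> int:
--     n = len(points)
--     max_area = 0
--
--     for i in range(n):
--         for j in range(i + 1, n):
--             p1 = points[i]
--             p2 = points[j]
--
--             area = rectangle_area(p1, p2)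
--             if area <= max_area:
--                 continue
--
--             if rectangle_is_valid(p1, p2, points):
--                 max_area = area
--
--     return max_area
-- ===== SOURCE B (Python) =====
-- from typing import List, Tuple
--
-- Point = Tuple[int, int]
--
-- def rectangle_area(p1: Point, p2: Point) -> int:
--     x1, y1 = p1
--     x2, y2 = p2
--     width = abs(x1 - x2) + 1
--     height = abs(y1 - y2) + 1
--     return width * height
--
-- def rectangle_is_valid(p1: Point, p2: Point, poly: List[Point]) -> bool:
--     x1, y1 = p1
--     x2, y2 = p2
--
--     x_min = min(x1, x2)
--     x_max = max(x1, x2)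
--     y_min = min(y1, y2)
--     y_max = max(y1, y2)
--
--     n = len(poly)
--
--     for i in range(n):
--         lx, ly = poly[i]
--         lx2, ly2 = poly[(i + 1) % n]
--
--         if (
--             max(lx, lx2) <= x_min
--             or min(lx, lx2) >= x_max
--             or max(ly, ly2) <= y_min
--             or min(ly, ly2) >= y_max
--         ):
--             continue
--
--         return False
--
--     return True
--
-- def max_rectangle_area_part2(points: List[Point]) -> int:
--     n = len(points)
--     candidates = [(rectangle_area(points[i], points[j]), i, j)
--                   for i in range(n) for j in range(i + 1, n)]
--     candidates.sort(key=lambda t: t[0], reverse=True)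
--     for area, i, j in candidates:
--         if rectangle_is_valid(points[i], points[j], points):
--             return area
--     return 0
-- ===== Notes on version B (the rewrite author's own statement) =====
-- stated objective: alternative
-- what changed: Replaced the nested-loop scan-and-update running max (with an area<=max early skip) by: build the full candidate list (area, i, j) over all i<j, sort it by area descending, and return the area of the first candidate that passes the unchanged validity test (0 if none).
import Mathlib
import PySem

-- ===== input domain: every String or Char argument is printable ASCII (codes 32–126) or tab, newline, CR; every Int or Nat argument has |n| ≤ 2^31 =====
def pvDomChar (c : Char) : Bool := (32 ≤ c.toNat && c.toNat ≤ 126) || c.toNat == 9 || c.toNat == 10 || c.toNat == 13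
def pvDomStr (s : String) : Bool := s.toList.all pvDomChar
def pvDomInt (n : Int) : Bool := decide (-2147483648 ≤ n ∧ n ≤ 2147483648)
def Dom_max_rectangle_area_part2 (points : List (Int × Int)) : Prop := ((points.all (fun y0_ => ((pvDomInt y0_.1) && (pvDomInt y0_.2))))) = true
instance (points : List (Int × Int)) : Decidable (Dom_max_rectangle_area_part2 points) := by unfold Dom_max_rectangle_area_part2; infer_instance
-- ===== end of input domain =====

-- B replaces A's scan-and-update running max with: build all candidate pairs, sort by
-- area descending, return the first valid one's area (alternative decomposition, not faster).

-- ===== PORT A =====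
-- shared helpers (identical in Source A and Source B)
def rectangleArea (p1 p2 : Int × Int) : Int :=
  let width := |p1.1 - p2.1| + 1
  let height := |p1.2 - p2.2| + 1
  width * height

-- indices produced by the loops are always in range, so pyGetD's default is never used
def rectangleIsValid (p1 p2 : Int × Int) (poly : List (Int × Int)) : Bool :=
  let x_min := min p1.1 p2.1
  let x_max := max p1.1 p2.1
  let y_min := min p1.2 p2.2
  let y_max := max p1.2 p2.2
  let n : Int := poly.length
  (PySem.List.pyRange 0 n 1).all (fun i =>
    let l := PySem.List.pyGetD poly i (0, 0)
    let l2 := PySem.List.pyGetD poly (PySem.Int.mod (i + 1) n) (0, 0)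
    decide (max l.1 l2.1 ≤ x_min) || decide (min l.1 l2.1 ≥ x_max) ||
    decide (max l.2 l2.2 ≤ y_min) || decide (min l.2 l2.2 ≥ y_max))

def max_rectangle_area_part2 (points : List (Int × Int)) : Int :=
  let n : Int := points.length
  (PySem.List.pyRange 0 n 1).foldl (fun max_area i =>
    (PySem.List.pyRange (i + 1) n 1).foldl (fun max_area j =>
      let p1 := PySem.List.pyGetD points i (0, 0)
      let p2 := PySem.List.pyGetD points j (0, 0)
      let area := rectangleArea p1 p2
      if area ≤ max_area then max_area
      else if rectangleIsValid p1 p2 points then area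
      else max_area) max_area) 0

-- ===== PORT B =====
def max_rectangle_area_part2_alt (points : List (Int × Int)) : Int :=
  let n : Int := points.length
  let candidates := (PySem.List.pyRange 0 n 1).flatMap (fun i =>
    (PySem.List.pyRange (i + 1) n 1).map (fun j =>
      (rectangleArea (PySem.List.pyGetD points i (0, 0)) (PySem.List.pyGetD points j (0, 0)), i, j)))
  let sortedC := PySem.List.sorted candidates (fun t => t.1) true
  match sortedC.find? (fun t =>
      rectangleIsValid (PySem.List.pyGetD points t.2.1 (0, 0))
        (PySem.List.pyGetD points t.2.2 (0, 0)) points) with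
  | some t => t.1
  | none => 0

-- ===== PRECONDITION & SPEC =====
def Spec_max_rectangle_area_part2 (points : List (Int × Int)) (out : Int) : Prop := out = max_rectangle_area_part2_alt points
instance (points : List (Int × Int)) (out : Int) : Decidable (Spec_max_rectangle_area_part2 points out) := by unfold Spec_max_rectangle_area_part2; infer_instance

-- ===== CLAIM (what is proved, stated in full; the proofs are below) =====
def Claim_equal_max_rectangle_area_part2 : Prop := ∀ (points : List (Int × Int)), Dom_max_rectangle_area_part2 points → Spec_max_rectangle_area_part2 points (max_rectangle_area_part2 points)

-- ===== LEMMAS AND PROOFS =====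

-- A's accumulator update, as a step over candidate triples
def stepA (g : Int × Int × Int → Bool) (acc : Int) (t : Int × Int × Int) : Int :=
  if t.1 ≤ acc then acc else if g t then t.1 else acc

-- A's loop equals a max-fold over the areas of the valid candidates
theorem foldl_stepA_eq (g : Int × Int × Int → Bool) (M : List (Int × Int × Int)) (acc : Int) :
    M.foldl (stepA g) acc = ((M.filter g).map (fun t => t.1)).foldl max acc := by
  induction M generalizing acc with
  | nil => rfl
  | cons t M ih =>
    by_cases hg : g t
    · simp [stepA, hg, ih]
      congr 1
      rcases le_or_gt t.1 acc with hle | hlt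
      · rw [if_pos hle, max_eq_left hle]
      · rw [if_neg (not_le.mpr hlt), max_eq_right (le_of_lt hlt)]
    · simp [stepA, hg, ih]

theorem foldl_max_const (as : List Int) (acc : Int) (h : ∀ x ∈ as, x ≤ acc) :
    as.foldl max acc = acc := by
  induction as with
  | nil => rfl
  | cons a as ih =>
    have ha := h a (by simp)
    simp only [List.foldl_cons, max_eq_left ha]
    exact ih (fun x hx => h x (by simp [hx]))

-- on a descending list of positive-area candidates, the first valid one's area is the max
theorem find?_desc_eq_max (g : Int × Int × Int → Bool) (S : List (Int × Int × Int))
    (hd : S.Pairwise (fun a b => b.1 ≤ a.1)) (hpos : ∀ t ∈ S, 1 ≤ t.1) :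
    (match S.find? g with | some t => t.1 | none => 0)
      = ((S.filter g).map (fun t => t.1)).foldl max 0 := by
  induction S with
  | nil => rfl
  | cons t S ih =>
    rcases List.pairwise_cons.mp hd with ⟨hle, hd'⟩
    by_cases hg : g t
    · simp only [List.filter_cons_of_pos hg, List.map_cons, List.foldl_cons]
      have h0 : max 0 t.1 = t.1 := max_eq_right (le_trans (by norm_num) (hpos t (by simp)))
      rw [List.find?_cons_of_pos hg, h0]
      rw [foldl_max_const]
      intro x hx
      rcases List.mem_map.mp hx with ⟨u, hu, rfl⟩
      exact hle u (List.mem_of_mem_filter hu)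
    · rw [List.find?_cons_of_neg hg, List.filter_cons_of_neg hg]
      exact ih hd' (fun u hu => hpos u (by simp [hu]))

theorem foldl_max_perm {as bs : List Int} (h : as.Perm bs) (acc : Int) :
    as.foldl max acc = bs.foldl max acc := by
  have : RightCommutative (max : Int → Int → Int) := ⟨fun a b c => by rw [max_right_comm]⟩
  exact h.foldl_eq acc

-- every candidate's area component is ≥ 1
theorem area_pos (p q : Int × Int) : 1 ≤ rectangleArea p q := by
  unfold rectangleArea
  have h1 := abs_nonneg (p.1 - q.1)
  have h2 := abs_nonneg (p.2 - q.2)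
  nlinarith

-- ===== VERDICT (by name: the statement is the Claim_ definition above) =====
theorem max_rectangle_area_part2_spec : Claim_equal_max_rectangle_area_part2 := by
  intro points _
  unfold Spec_max_rectangle_area_part2 max_rectangle_area_part2 max_rectangle_area_part2_alt
  set n : Int := (points.length : Int) with hn
  set g : Int × Int × Int → Bool := fun t =>
    rectangleIsValid (PySem.List.pyGetD points t.2.1 (0, 0))
      (PySem.List.pyGetD points t.2.2 (0, 0)) points with hgdef
  set cands := (PySem.List.pyRange 0 n 1).flatMap (fun i =>
    (PySem.List.pyRange (i + 1) n 1).map (fun j =>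
      (rectangleArea (PySem.List.pyGetD points i (0, 0)) (PySem.List.pyGetD points j (0, 0)), i, j)))
    with hcands
  -- A's nested loop = stepA-fold over cands
  have hA : (PySem.List.pyRange 0 n 1).foldl (fun max_area i =>
      (PySem.List.pyRange (i + 1) n 1).foldl (fun max_area j =>
        let p1 := PySem.List.pyGetD points i (0, 0)
        let p2 := PySem.List.pyGetD points j (0, 0)
        let area := rectangleArea p1 p2
        if area ≤ max_area then max_area
        else if rectangleIsValid p1 p2 points then area
        else max_area) max_area) 0 = cands.foldl (stepA g) 0 := by
    rw [hcands, List.foldl_flatMap]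
    congr 1
    funext acc i
    rw [List.foldl_map]
    rfl
  rw [hA, foldl_stepA_eq]
  set S := PySem.List.sorted cands (fun t => t.1) true with hS
  have hperm : S.Perm cands := PySem.List.sorted_perm ..
  have hdesc : S.Pairwise (fun a b => b.1 ≤ a.1) := PySem.List.sorted_pairwise_rev ..
  have hpos : ∀ t ∈ S, 1 ≤ t.1 := by
    intro t ht
    have : t ∈ cands := hperm.mem_iff.mp ht
    rw [hcands] at this
    rcases List.mem_flatMap.mp this with ⟨i, _, hmem⟩
    rcases List.mem_map.mp hmem with ⟨j, _, rfl⟩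
    exact area_pos _ _
  rw [foldl_max_perm (((hperm.filter g).map (fun t => t.1)).symm)]
  exact (find?_desc_eq_max g S hdesc hpos).symm
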